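-- pv_equiv track=rewrite | github.com/cog-model/slam-cartographer-and-rtabmap | cartographer_ws/src/kas_utils/python/src/kas_utils/matching.py | _find_boundary_indices
-- ===== SOURCE A (Python) =====
-- def _find_boundary_indices(array, value):
--     assert len(array) > 0
--     lower_index = None
--     lower_min_difference = -1
--     upper_index = None
--     upper_min_difference = -1
--     for i in range(len(array)):
--         assert array[i] != value
--         if array[i] < value:
--             if lower_min_difference > value - array[i] or lower_min_difference < 0:
--                 lower_index = i
--                 lower_min_difference = value - array[i]
--         if array[i] > value:
--             if upper_min_difference > array[i] - value or upper_min_difference < 0: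
--                 upper_index = i
--                 upper_min_difference = array[i] - value
--     return lower_index, upper_index
-- ===== SOURCE B (Python) =====
-- def _find_boundary_indices(array, value):
--     assert len(array) > 0
--     for x in array:
--         assert x != value
--     below = [i for i in range(len(array)) if array[i] < value]
--     above = [i for i in range(len(array)) if array[i] > value]
--     lower_index = max(below, key=lambda i: array[i]) if below else None
--     upper_index = min(above, key=lambda i: array[i]) if above else None
--     return lower_index, upper_index
-- ===== Notes on version B (the rewrite author's own statement) =====
-- stated objective: simpler
-- what changed: Replaces A's single loop carrying four pieces of running min-difference state with two index comprehensions followed by a keyed max/min reduction (nearest-below is the largest element below value, nearest-above the smallest above; Python's max/min keep the first occurrence on ties, matching A's strict-improvement updates).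
import Mathlib
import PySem

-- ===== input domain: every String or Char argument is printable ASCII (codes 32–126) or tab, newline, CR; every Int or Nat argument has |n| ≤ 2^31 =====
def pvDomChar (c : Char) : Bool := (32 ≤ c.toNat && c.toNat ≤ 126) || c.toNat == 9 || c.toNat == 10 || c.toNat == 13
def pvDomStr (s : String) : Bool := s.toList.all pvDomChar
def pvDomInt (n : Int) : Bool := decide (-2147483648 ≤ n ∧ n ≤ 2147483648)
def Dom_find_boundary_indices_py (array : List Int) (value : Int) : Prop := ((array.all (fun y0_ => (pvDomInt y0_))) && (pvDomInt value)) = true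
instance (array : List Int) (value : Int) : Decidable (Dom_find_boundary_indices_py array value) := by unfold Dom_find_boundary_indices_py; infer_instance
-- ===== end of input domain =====

-- B replaces A's one loop with four pieces of running min-difference state by two index filters
-- followed by a keyed max/min reduction (objective: simpler).


-- ===== PORT A =====
-- one step of A's loop body (array[i] accessed by index; state = (lower_index, lower_min_difference, upper_index, upper_min_difference))
def fbiStepA (array : List Int) (value : Int)
    (s : Option Int × Int × Option Int × Int) (i : Int) : Option Int × Int × Option Int × Int :=
  let x := PySem.List.pyGetD array i 0      -- array[i]; i ∈ range(len(array)) is always in range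
  let lp :=
    if x < value then
      if s.2.1 > value - x ∨ s.2.1 < 0 then (some i, value - x)
      else (s.1, s.2.1)
    else (s.1, s.2.1)
  let up :=
    if x > value then
      if s.2.2.2 > x - value ∨ s.2.2.2 < 0 then (some i, x - value)
      else (s.2.2.1, s.2.2.2)
    else (s.2.2.1, s.2.2.2)
  (lp.1, lp.2, up.1, up.2)

def find_boundary_indices_py (array : List Int) (value : Int) : Option Int × Option Int :=
  let s := (PySem.List.pyRange 0 (array.length : Int) 1).foldl (fbiStepA array value) (none, -1, none, -1)
  (s.1, s.2.2.1)

-- ===== PORT B =====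
def find_boundary_indices_py_alt (array : List Int) (value : Int) : Option Int × Option Int :=
  let below := (PySem.List.pyRange 0 (array.length : Int) 1).filter
      (fun i => decide (PySem.List.pyGetD array i 0 < value))
  let above := (PySem.List.pyRange 0 (array.length : Int) 1).filter
      (fun i => decide (value < PySem.List.pyGetD array i 0))
  (PySem.List.max? below (fun i => PySem.List.pyGetD array i 0),
   PySem.List.min? above (fun i => PySem.List.pyGetD array i 0))

-- ===== PRECONDITION & SPEC =====
-- A (and B) raise AssertionError on an empty array or when value occurs in the array.
def Pre_find_boundary_indices_py (array : List Int) (value : Int) : Prop :=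
  array ≠ [] ∧ value ∉ array
instance (array : List Int) (value : Int) : Decidable (Pre_find_boundary_indices_py array value) := by
  unfold Pre_find_boundary_indices_py; infer_instance

def pvWitness_find_boundary_indices_py : List Int × Int := ([1, 4, 3], 2)

def Spec_find_boundary_indices_py (array : List Int) (value : Int) (out : Option Int × Option Int) : Prop := out = find_boundary_indices_py_alt array value
instance (array : List Int) (value : Int) (out : Option Int × Option Int) : Decidable (Spec_find_boundary_indices_py array value out) := by unfold Spec_find_boundary_indices_py; infer_instance

-- ===== CLAIM (what is proved, stated in full; the proofs are below) =====
def Claim_equal_find_boundary_indices_py : Prop := ∀ (array : List Int) (value : Int), Dom_find_boundary_indices_py array value → Pre_find_boundary_indices_py array value → Spec_find_boundary_indices_py array value (find_boundary_indices_py array value)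

-- ===== LEMMAS AND PROOFS =====

-- max?'s / min?'s folding functions with the key (fun i => array[i])
def fbiMaxF (array : List Int) (a : Option Int) (i : Int) : Option Int :=
  match a with
  | none => some i
  | some m => if PySem.List.pyGetD array m 0 < PySem.List.pyGetD array i 0 then some i else some m

def fbiMinF (array : List Int) (a : Option Int) (i : Int) : Option Int :=
  match a with
  | none => some i
  | some m => if PySem.List.pyGetD array i 0 < PySem.List.pyGetD array m 0 then some i else some m

-- effect of one A-step on the lower / upper index component
def fbiLStep (array : List Int) (value : Int) (a : Option Int) (i : Int) : Option Int :=
  if PySem.List.pyGetD array i 0 < value then fbiMaxF array a i else a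

def fbiUStep (array : List Int) (value : Int) (a : Option Int) (i : Int) : Option Int :=
  if value < PySem.List.pyGetD array i 0 then fbiMinF array a i else a

-- the stored minimal differences of A, as a function of the stored index
def fbiLd (array : List Int) (value : Int) : Option Int → Int
  | none => -1
  | some m => value - PySem.List.pyGetD array m 0

def fbiUd (array : List Int) (value : Int) : Option Int → Int
  | none => -1
  | some m => PySem.List.pyGetD array m 0 - value

lemma fbiLStep_inv (array : List Int) (value : Int) (a : Option Int) (i : Int)
    (h : ∀ m, a = some m → PySem.List.pyGetD array m 0 < value) :
    ∀ m, fbiLStep array value a i = some m → PySem.List.pyGetD array m 0 < value := by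
  intro m hm
  unfold fbiLStep fbiMaxF at hm
  by_cases hi : PySem.List.pyGetD array i 0 < value
  · rw [if_pos hi] at hm
    rcases a with _ | m'
    · exact (Option.some.inj hm) ▸ hi
    · dsimp only at hm
      split_ifs at hm
      · exact (Option.some.inj hm) ▸ hi
      · exact (Option.some.inj hm) ▸ h m' rfl
  · rw [if_neg hi] at hm
    exact h m hm

lemma fbiUStep_inv (array : List Int) (value : Int) (a : Option Int) (i : Int)
    (h : ∀ m, a = some m → value < PySem.List.pyGetD array m 0) :
    ∀ m, fbiUStep array value a i = some m → value < PySem.List.pyGetD array m 0 := by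
  intro m hm
  unfold fbiUStep fbiMinF at hm
  by_cases hi : value < PySem.List.pyGetD array i 0
  · rw [if_pos hi] at hm
    rcases a with _ | m'
    · exact (Option.some.inj hm) ▸ hi
    · dsimp only at hm
      split_ifs at hm
      · exact (Option.some.inj hm) ▸ hi
      · exact (Option.some.inj hm) ▸ h m' rfl
  · rw [if_neg hi] at hm
    exact h m hm

-- one step of A's loop keeps the state in the shape (idx, diff-of-idx, idx, diff-of-idx)
lemma fbiStepA_eq (array : List Int) (value : Int) (li ui : Option Int) (i : Int)
    (hl : ∀ m, li = some m → PySem.List.pyGetD array m 0 < value)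
    (hu : ∀ m, ui = some m → value < PySem.List.pyGetD array m 0) :
    fbiStepA array value (li, fbiLd array value li, ui, fbiUd array value ui) i =
      (fbiLStep array value li i, fbiLd array value (fbiLStep array value li i),
       fbiUStep array value ui i, fbiUd array value (fbiUStep array value ui i)) := by
  have hm := fun m => hl m
  have hm' := fun m => hu m
  rcases li with _ | m <;> rcases ui with _ | m' <;>
      [skip; replace hm' := hm' m' rfl; replace hm := hm m rfl;
       (replace hm := hm m rfl; replace hm' := hm' m' rfl)] <;>
    simp only [fbiStepA, fbiLStep, fbiUStep, fbiMaxF, fbiMinF, fbiLd, fbiUd] <;>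
    split_ifs <;> simp_all <;> omega

lemma fbi_fold_eq (array : List Int) (value : Int) :
    ∀ (l : List Int) (li ui : Option Int),
      (∀ m, li = some m → PySem.List.pyGetD array m 0 < value) →
      (∀ m, ui = some m → value < PySem.List.pyGetD array m 0) →
      l.foldl (fbiStepA array value) (li, fbiLd array value li, ui, fbiUd array value ui) =
        ((l.filter (fun i => decide (PySem.List.pyGetD array i 0 < value))).foldl (fbiMaxF array) li,
         fbiLd array value ((l.filter (fun i => decide (PySem.List.pyGetD array i 0 < value))).foldl (fbiMaxF array) li),
         (l.filter (fun i => decide (value < PySem.List.pyGetD array i 0))).foldl (fbiMinF array) ui,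
         fbiUd array value ((l.filter (fun i => decide (value < PySem.List.pyGetD array i 0))).foldl (fbiMinF array) ui)) := by
  intro l
  induction l with
  | nil => intro li ui _ _; simp
  | cons i l ih =>
    intro li ui hl hu
    rw [List.foldl_cons, fbiStepA_eq array value li ui i hl hu,
        ih _ _ (fbiLStep_inv array value li i hl) (fbiUStep_inv array value ui i hu)]
    by_cases h1 : PySem.List.pyGetD array i 0 < value <;>
      by_cases h2 : value < PySem.List.pyGetD array i 0
    · exact absurd (h1.trans h2) (lt_irrefl _)
    · simp [h1, h2, fbiLStep, fbiUStep]
    · simp [h1, h2, fbiLStep, fbiUStep]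
    · simp [h1, h2, fbiLStep, fbiUStep]

lemma fbi_max?_eq (array : List Int) (l : List Int) :
    PySem.List.max? l (fun i => PySem.List.pyGetD array i 0) = l.foldl (fbiMaxF array) none := by
  unfold PySem.List.max?
  exact List.foldl_ext _ _ none (fun a x _ => by cases a <;> rfl)

lemma fbi_min?_eq (array : List Int) (l : List Int) :
    PySem.List.min? l (fun i => PySem.List.pyGetD array i 0) = l.foldl (fbiMinF array) none := by
  unfold PySem.List.min?
  exact List.foldl_ext _ _ none (fun a x _ => by cases a <;> rfl)

-- ===== VERDICT (by name: the statement is the Claim_ definition above) =====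
theorem find_boundary_indices_py_spec : Claim_equal_find_boundary_indices_py := by
  intro array value _ _
  unfold Spec_find_boundary_indices_py find_boundary_indices_py find_boundary_indices_py_alt
  dsimp only
  rw [show (none, (-1 : Int), none, (-1 : Int)) =
      (none, fbiLd array value none, none, fbiUd array value none) from rfl,
    fbi_fold_eq array value _ none none (by intro m h; cases h) (by intro m h; cases h),
    fbi_max?_eq, fbi_min?_eq]
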